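-- pv_equiv track=rewrite | github.com/PhoebeHuHu/clear-backend | app/utils/cargo_edi/edi_generator.py | escape_quotes
-- ===== SOURCE A (Python) =====
-- from typing import TYPE_CHECKING, Optional
--
-- def escape_quotes(value: Optional[str]) -> str:
--     """
--     Escape single quotes in EDI values.
--     In EDI, single quote (') is the end-of-line delimiter.
--     When a single quote appears in the actual value, it needs to be escaped with a question mark (?).
--     For example: ABC'345 -> ABC?'345
--
--     If there are consecutive question marks before a quote, they should be reduced to a single one.
--     For example: ABC??'123 -> ABC?'123
--
--     The question mark (?) functions as an escape character, so when ?' appears,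
--     the quote is treated as literal text rather than a delimiter.
--
--     If value is None, returns an empty string.
--     """
--     if value is None:
--         return ""
--
--     # First handle any existing consecutive question marks
--     result = value
--     while "??" in result:
--         result = result.replace("??", "?")
--
--     # Then escape any unescaped quotes
--     # If a quote is not preceded by a question mark, escape it
--     final = ""
--     i = 0
--     while i < len(result):
--         if result[i] == "'" and (i == 0 or result[i-1] != "?"):
--             final += "?'"
--         else:
--             final += result[i]
--         i += 1
--
--     return final
-- ===== SOURCE B (Python) =====
-- def escape_quotes(value):
--     """Single linear pass: collapse runs of '?' to one and escape unescaped quotes."""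
--     if value is None:
--         return ""
--     out = []
--     prev = ""
--     for c in value:
--         if c == "?" and prev == "?":
--             continue
--         if c == "'" and prev != "?":
--             out.append("?")
--         out.append(c)
--         prev = c
--     return "".join(out)
-- ===== Notes on version B (the rewrite author's own statement) =====
-- stated objective: faster
-- what changed: A repeatedly rescans and rewrites the whole string (replacing each double question mark by a single one until none remain) and then makes a second escaping scan; B does one linear left-to-right pass that skips a question mark following another and inserts the escape before an unescaped quote.
import Mathlib
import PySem

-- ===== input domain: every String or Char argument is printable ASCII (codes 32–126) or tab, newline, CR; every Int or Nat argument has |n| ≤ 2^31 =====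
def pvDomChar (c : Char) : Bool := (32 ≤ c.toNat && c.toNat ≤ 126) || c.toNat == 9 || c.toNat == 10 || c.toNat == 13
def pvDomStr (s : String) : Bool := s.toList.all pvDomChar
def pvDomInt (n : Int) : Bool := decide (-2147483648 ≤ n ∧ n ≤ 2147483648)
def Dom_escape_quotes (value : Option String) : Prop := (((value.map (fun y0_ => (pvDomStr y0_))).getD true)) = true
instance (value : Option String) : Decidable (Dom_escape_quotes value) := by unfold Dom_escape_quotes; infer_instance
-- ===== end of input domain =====

-- B replaces A's repeated whole-string replace('??','?') passes plus a second escaping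
-- scan by ONE linear pass that skips a '?' following a '?' and escapes unescaped quotes.

-- ===== PORT A =====
-- One pass of Python's result.replace("??", "?"), as a structural recursion; used to prove
-- the termination of A's `while "??" in result` loop (the port itself cites pvReplaceQQ_len_lt).
def pvRep : List Char → List Char
  | [] => []
  | [c] => [c]
  | c :: c0 :: t => if c = '?' ∧ c0 = '?' then '?' :: pvRep t else c :: pvRep (c0 :: t)
termination_by l => l.length

theorem pvRep_go (fuel : Nat) : ∀ (m acc : List Char), m.length ≤ fuel →
    PySem.Chars.replace.go ['?', '?'] ['?'] fuel m acc = acc.reverse ++ pvRep m := by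
  induction fuel with
  | zero =>
    intro m acc hm
    have : m = [] := List.length_eq_zero_iff.mp (Nat.le_zero.mp hm)
    subst this
    simp [PySem.Chars.replace.go, pvRep]
  | succ n ih =>
    intro m acc hm
    match m with
    | [] => simp [PySem.Chars.replace.go, pvRep]
    | [c] =>
      have hp : List.isPrefixOf ['?', '?'] [c] = false := by
        simp [List.isPrefixOf]
      rw [PySem.Chars.replace.go, hp]
      simp only [Bool.false_eq_true, if_false]
      rw [ih [] (c :: acc) (by simp)]
      simp [pvRep]
    | c :: c0 :: t' =>
      by_cases hqq : c = '?' ∧ c0 = '?'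
      · obtain ⟨rfl, rfl⟩ := hqq
        have hp : List.isPrefixOf ['?', '?'] ('?' :: '?' :: t') = true := by
          simp [List.isPrefixOf]
        rw [PySem.Chars.replace.go, hp]
        simp only [if_true]
        have ht' : t'.length ≤ n := by simp at hm; omega
        rw [show List.drop (['?','?'] : List Char).length ('?' :: '?' :: t') = t' from rfl]
        rw [ih t' _ ht']
        simp [pvRep]
      · have hp : List.isPrefixOf ['?', '?'] (c :: c0 :: t') = false := by
          simp [List.isPrefixOf]
          intro h1 h2
          exact hqq ⟨h1.symm, h2.symm⟩
        rw [PySem.Chars.replace.go, hp]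
        simp only [Bool.false_eq_true, if_false]
        rw [ih (c0 :: t') (c :: acc) (by simp at hm ⊢; omega)]
        rw [show pvRep (c :: c0 :: t') = c :: pvRep (c0 :: t') by rw [pvRep]; simp [hqq]]
        simp

theorem pvReplace_eq_pvRep (l : List Char) :
    PySem.Chars.replace l ['?', '?'] ['?'] = pvRep l := by
  have h : (['?', '?'] : List Char).isEmpty = false := rfl
  simp [PySem.Chars.replace, h, pvRep_go l.length l [] le_rfl]

theorem pvRep_len (n : Nat) : ∀ (l : List Char), l.length ≤ n →
    (pvRep l).length ≤ l.length ∧ (['?', '?'] <:+: l → (pvRep l).length < l.length) := by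
  induction n with
  | zero =>
    intro l hl
    have : l = [] := List.length_eq_zero_iff.mp (Nat.le_zero.mp hl)
    subst this
    exact ⟨by simp [pvRep], by intro h; have := h.length_le; simp at this⟩
  | succ n ih =>
    intro l hl
    match l with
    | [] => exact ⟨by simp [pvRep], by intro h; have := h.length_le; simp at this⟩
    | [c] =>
      refine ⟨by simp [pvRep], ?_⟩
      intro h; have := h.length_le; simp at this
    | c :: c0 :: t' =>
      by_cases hqq : c = '?' ∧ c0 = '?'
      · obtain ⟨rfl, rfl⟩ := hqq
        have h1 := (ih t' (by simp at hl; omega)).1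
        rw [show pvRep ('?' :: '?' :: t') = '?' :: pvRep t' by rw [pvRep]; simp]
        constructor
        · simp only [List.length_cons]; omega
        · intro _; simp only [List.length_cons]; omega
      · have h1 := ih (c0 :: t') (by simp at hl ⊢; omega)
        rw [show pvRep (c :: c0 :: t') = c :: pvRep (c0 :: t') by rw [pvRep]; simp [hqq]]
        constructor
        · simp; exact h1.1
        · intro hinf
          rcases List.infix_cons_iff.mp hinf with hpre | hinf'
          · rcases hpre with ⟨r, hr⟩
            simp at hr
            exact absurd ⟨hr.1.symm, hr.2.1.symm⟩ hqq
          · have := h1.2 hinf'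
            simp only [List.length_cons] at this ⊢
            omega

-- termination helper for the `while "??" in result` loop: one replace pass strictly shrinks
theorem pvReplaceQQ_len_lt (l : List Char) (h : PySem.Chars.isIn ['?', '?'] l = true) :
    (PySem.Chars.replace l ['?', '?'] ['?']).length < l.length := by
  rw [pvReplace_eq_pvRep]
  exact (pvRep_len l.length l le_rfl).2 ((PySem.Chars.isIn_iff_infix _ _).mp h)

-- `while "??" in result: result = result.replace("??", "?")`
def pvCollapseFix (l : List Char) : List Char :=
  if h : PySem.Chars.isIn ['?', '?'] l = true then
    pvCollapseFix (PySem.Chars.replace l ['?', '?'] ['?'])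
  else l
termination_by l.length
decreasing_by exact pvReplaceQQ_len_lt l h

-- the second while loop of A: index i over `result`, `prev` is result[i-1] (none at i = 0)
def pvEscLoopA (prev : Option Char) : List Char → List Char
  | [] => []
  | c :: t =>
    if c = '\'' ∧ prev ≠ some '?' then '?' :: '\'' :: pvEscLoopA (some c) t
    else c :: pvEscLoopA (some c) t

def escape_quotes (value : Option String) : String :=
  match value with
  | none => ""
  | some v => String.mk (pvEscLoopA none (pvCollapseFix v.toList))

-- ===== PORT B =====
def escape_quotes_alt (value : Option String) : String :=
  match value with
  | none => ""
  | some v =>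
    let st := v.toList.foldl
      (fun (st : List Char × Option Char) c =>
        if c = '?' ∧ st.2 = some '?' then st
        else if c = '\'' ∧ st.2 ≠ some '?' then (st.1 ++ ['?', c], some c)
        else (st.1 ++ [c], some c))
      ([], none)
    String.mk st.1

-- ===== PRECONDITION & SPEC =====
def Spec_escape_quotes (value : Option String) (out : String) : Prop := out = escape_quotes_alt value
instance (value : Option String) (out : String) : Decidable (Spec_escape_quotes value out) := by unfold Spec_escape_quotes; infer_instance

-- ===== CLAIM (what is proved, stated in full; the proofs are below) =====
def Claim_equal_escape_quotes : Prop := ∀ (value : Option String), Dom_escape_quotes value → Spec_escape_quotes value (escape_quotes value)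

-- ===== LEMMAS AND PROOFS =====

-- recursive form of B's fold
def pvOnep (prev : Option Char) : List Char → List Char
  | [] => []
  | c :: t =>
    if c = '?' ∧ prev = some '?' then pvOnep prev t
    else if c = '\'' ∧ prev ≠ some '?' then '?' :: c :: pvOnep (some c) t
    else c :: pvOnep (some c) t

theorem pvFoldB_eq (l : List Char) : ∀ (acc : List Char) (prev : Option Char),
    (l.foldl
      (fun (st : List Char × Option Char) c =>
        if c = '?' ∧ st.2 = some '?' then st
        else if c = '\'' ∧ st.2 ≠ some '?' then (st.1 ++ ['?', c], some c)
        else (st.1 ++ [c], some c))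
      (acc, prev)).1 = acc ++ pvOnep prev l := by
  induction l with
  | nil => intro acc prev; simp [pvOnep]
  | cons c t ih =>
    intro acc prev
    simp only [List.foldl_cons]
    by_cases h1 : c = '?' ∧ prev = some '?'
    · rw [if_pos h1, ih, pvOnep, if_pos h1]
    · rw [if_neg h1]
      by_cases h2 : c = '\'' ∧ prev ≠ some '?'
      · rw [if_pos h2, ih, pvOnep, if_neg h1, if_pos h2, List.append_assoc]
        rfl
      · rw [if_neg h2, ih, pvOnep, if_neg h1, if_neg h2, List.append_assoc]
        rfl

-- one-step unfolding of pvOnep on a cons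
theorem pvOnep_cons (prev : Option Char) (c : Char) (t : List Char) :
    pvOnep prev (c :: t) =
      if c = '?' ∧ prev = some '?' then pvOnep prev t
      else if c = '\'' ∧ prev ≠ some '?' then '?' :: c :: pvOnep (some c) t
      else c :: pvOnep (some c) t := by
  rw [pvOnep]

-- pvOnep is invariant under one replace pass
theorem pvOnep_rep (n : Nat) : ∀ (l : List Char), l.length ≤ n → ∀ (prev : Option Char),
    pvOnep prev (pvRep l) = pvOnep prev l := by
  induction n with
  | zero =>
    intro l hl prev
    have : l = [] := List.length_eq_zero_iff.mp (Nat.le_zero.mp hl)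
    subst this; rw [show pvRep [] = [] from by simp [pvRep]]
  | succ n ih =>
    intro l hl prev
    match l with
    | [] => rw [show pvRep [] = [] from by simp [pvRep]]
    | [c] => rw [show pvRep [c] = [c] from by simp [pvRep]]
    | c :: c0 :: t' =>
      by_cases hqq : c = '?' ∧ c0 = '?'
      · obtain ⟨rfl, rfl⟩ := hqq
        rw [show pvRep ('?' :: '?' :: t') = '?' :: pvRep t' by rw [pvRep]; simp]
        have ht' : t'.length ≤ n := by simp at hl; omega
        by_cases hp : prev = some '?'
        · have hL : pvOnep prev ('?' :: pvRep t') = pvOnep prev (pvRep t') := by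
            rw [pvOnep_cons, if_pos ⟨rfl, hp⟩]
          have hR : pvOnep prev ('?' :: '?' :: t') = pvOnep prev t' := by
            rw [pvOnep_cons, if_pos ⟨rfl, hp⟩, pvOnep_cons, if_pos ⟨rfl, hp⟩]
          rw [hL, hR]
          exact ih t' ht' prev
        · have hc2 : ¬('?' = '\'' ∧ prev ≠ some '?') := by simp
          have hL : pvOnep prev ('?' :: pvRep t') = '?' :: pvOnep (some '?') (pvRep t') := by
            rw [pvOnep_cons, if_neg (by simp [hp]), if_neg hc2]
          have hR : pvOnep prev ('?' :: '?' :: t') = '?' :: pvOnep (some '?') t' := by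
            rw [pvOnep_cons, if_neg (by simp [hp]), if_neg hc2, pvOnep_cons,
              if_pos (⟨rfl, rfl⟩ : '?' = '?' ∧ some '?' = some '?')]
          rw [hL, hR, ih t' ht' (some '?')]
      · rw [show pvRep (c :: c0 :: t') = c :: pvRep (c0 :: t') by rw [pvRep]; simp [hqq]]
        have ht : (c0 :: t').length ≤ n := by simp at hl ⊢; omega
        rw [pvOnep_cons prev c (pvRep (c0 :: t')), pvOnep_cons prev c (c0 :: t')]
        split_ifs
        · exact ih _ ht prev
        · rw [ih _ ht (some c)]
        · rw [ih _ ht (some c)]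

-- pvOnep is invariant under A's whole while-replace loop
theorem pvOnep_collapseFix (l : List Char) (prev : Option Char) :
    pvOnep prev (pvCollapseFix l) = pvOnep prev l := by
  induction l using pvCollapseFix.induct with
  | case1 l h ih =>
    rw [pvCollapseFix, dif_pos h, ih, pvReplace_eq_pvRep]
    exact pvOnep_rep l.length l le_rfl prev
  | case2 l h =>
    rw [pvCollapseFix, dif_neg h]

-- the while loop exits with no "??" left
theorem pvCollapseFix_noQQ (l : List Char) :
    PySem.Chars.isIn ['?', '?'] (pvCollapseFix l) = false := by
  induction l using pvCollapseFix.induct with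
  | case1 l h ih => rw [pvCollapseFix, dif_pos h]; exact ih
  | case2 l h => rw [pvCollapseFix, dif_neg h]; simpa using h

-- on a string without "??", A's escaping scan agrees with B's single pass
theorem pvEscLoopA_eq_pvOnep (l : List Char) : ∀ (prev : Option Char),
    ¬ (['?', '?'] <:+: l) → (prev = some '?' → l.head? ≠ some '?') →
    pvEscLoopA prev l = pvOnep prev l := by
  induction l with
  | nil => intro prev _ _; rfl
  | cons c t ih =>
    intro prev hinf hhd
    have hskip : ¬ (c = '?' ∧ prev = some '?') := by
      rintro ⟨rfl, hp⟩
      exact hhd hp (by simp)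
    rw [show pvEscLoopA prev (c :: t) =
        (if c = '\'' ∧ prev ≠ some '?' then '?' :: '\'' :: pvEscLoopA (some c) t
         else c :: pvEscLoopA (some c) t) from by rw [pvEscLoopA]]
    rw [pvOnep_cons, if_neg hskip]
    have htinf : ¬ (['?', '?'] <:+: t) := fun h => hinf (List.infix_cons h)
    have hhd' : some c = some '?' → t.head? ≠ some '?' := by
      intro hc ht
      apply hinf
      obtain ⟨t'', rfl⟩ : ∃ t'', t = '?' :: t'' := by
        cases t with
        | nil => simp at ht
        | cons a t'' =>
          simp at ht
          exact ⟨t'', by rw [ht]⟩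
      have hc' : c = '?' := by injection hc
      subst hc'
      exact ⟨[], t'', by simp⟩
    split_ifs with h
    · obtain ⟨hc, -⟩ := h
      subst hc
      rw [ih (some '\'') htinf hhd']
    · rw [ih (some c) htinf hhd']

-- ===== VERDICT (by name: the statement is the Claim_ definition above) =====
theorem escape_quotes_spec : Claim_equal_escape_quotes := by
  intro value _
  unfold Spec_escape_quotes
  match value with
  | none => rfl
  | some v =>
    show String.mk (pvEscLoopA none (pvCollapseFix v.toList)) =
      String.mk ((v.toList.foldl
        (fun (st : List Char × Option Char) c =>
          if c = '?' ∧ st.2 = some '?' then st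
          else if c = '\'' ∧ st.2 ≠ some '?' then (st.1 ++ ['?', c], some c)
          else (st.1 ++ [c], some c))
        ([], none)).1)
    rw [pvFoldB_eq v.toList [] none]
    have h1 : pvEscLoopA none (pvCollapseFix v.toList) = pvOnep none (pvCollapseFix v.toList) := by
      apply pvEscLoopA_eq_pvOnep
      · rw [← PySem.Chars.isIn_eq_false_iff]
        exact pvCollapseFix_noQQ v.toList
      · intro h; cases h
    rw [h1, pvOnep_collapseFix]
    rfl
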